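-- pv_equiv track=rewrite | github.com/Zergloin/hack | backend/app/services/forecast_service.py | _sanitize_history
-- ===== SOURCE A (Python) =====
-- from typing import Any, Literal
--
-- def _sanitize_history(historical_data: list[dict[str, Any]]) -> list[dict[str, int]]:
--     deduped: dict[int, int] = {}
--     for item in historical_data:
--         year = item.get("year")
--         population = item.get("population")
--         if year is None or population is None:
--             continue
--         deduped[int(year)] = int(population)
--
--     return [
--         {"year": year, "population": population}
--         for year, population in sorted(deduped.items())
--     ]
-- ===== SOURCE B (Python) =====
-- def _sanitize_history(historical_data):
--     pairs = []
--     for item in historical_data: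
--         year = item.get("year")
--         population = item.get("population")
--         if year is not None and population is not None:
--             pairs.append((int(year), int(population)))
--     pairs.sort(key=lambda p: p[0])  # stable: equal years keep input order
--     out = []
--     for y, p in pairs:
--         if out and out[-1][0] == y:
--             out[-1] = (y, p)      # last entry for a year wins
--         else:
--             out.append((y, p))
--     return [{"year": y, "population": p} for y, p in out]
-- ===== Notes on version B (the rewrite author's own statement) =====
-- stated objective: alternative
-- what changed: Replaces A's dict-keyed dedup followed by sorting the dict items with an in-order filter pass, a stable sort of the (year, population) pairs by year, and a single adjacent-collapse pass that keeps the last pair of each equal-year run.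
import Mathlib
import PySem

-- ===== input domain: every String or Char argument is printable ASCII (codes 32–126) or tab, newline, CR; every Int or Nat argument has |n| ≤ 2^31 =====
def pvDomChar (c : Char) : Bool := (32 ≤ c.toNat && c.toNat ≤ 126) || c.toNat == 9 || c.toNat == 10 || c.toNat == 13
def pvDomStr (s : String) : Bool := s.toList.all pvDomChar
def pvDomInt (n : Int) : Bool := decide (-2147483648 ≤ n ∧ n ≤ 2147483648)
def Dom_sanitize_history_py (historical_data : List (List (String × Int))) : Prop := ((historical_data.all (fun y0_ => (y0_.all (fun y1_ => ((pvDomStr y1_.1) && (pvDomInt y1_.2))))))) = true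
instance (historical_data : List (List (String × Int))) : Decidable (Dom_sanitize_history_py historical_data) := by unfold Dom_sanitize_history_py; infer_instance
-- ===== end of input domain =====

-- B replaces A's dict-keyed dedup + item sort by: filter pass, stable sort of the pairs by year,
-- then one adjacent-collapse pass keeping the last pair of each equal-year run (alternative decomposition).

-- ===== PORT A =====
def sanitize_history_py (historical_data : List (List (String × Int))) : List (List (String × Int)) :=
  let deduped : PySem.Dict Int Int :=
    historical_data.foldl (fun d item =>
      match (PySem.Dict.mk item).get? "year", (PySem.Dict.mk item).get? "population" with
      | some year, some population => d.insert year population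
      | _, _ => d) PySem.Dict.empty
  (PySem.List.sorted2 deduped.items Prod.fst Prod.snd false).map
    (fun yp => [("year", yp.1), ("population", yp.2)])

-- ===== PORT B =====
def sanitize_history_py_alt (historical_data : List (List (String × Int))) : List (List (String × Int)) :=
  let pairs : List (Int × Int) :=
    historical_data.foldl (fun acc item =>
      match (PySem.Dict.mk item).get? "year" with
      | none => acc
      | some year =>
        match (PySem.Dict.mk item).get? "population" with
        | none => acc
        | some population => acc ++ [(year, population)]) []
  let spairs := PySem.List.sorted pairs (fun p => p.1) false
  let out : List (Int × Int) :=
    spairs.foldl (fun out yp =>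
      match out.getLast? with
      | some last => if last.1 = yp.1 then out.dropLast ++ [yp] else out ++ [yp]
      | none => [yp]) []
  out.map (fun yp => [("year", yp.1), ("population", yp.2)])

-- ===== PRECONDITION & SPEC =====
def Spec_sanitize_history_py (historical_data : List (List (String × Int))) (out : List (List (String × Int))) : Prop := out = sanitize_history_py_alt historical_data
instance (historical_data : List (List (String × Int))) (out : List (List (String × Int))) : Decidable (Spec_sanitize_history_py historical_data out) := by unfold Spec_sanitize_history_py; infer_instance

-- ===== CLAIM (what is proved, stated in full; the proofs are below) =====
def Claim_equal_sanitize_history_py : Prop := ∀ (historical_data : List (List (String × Int))), Dom_sanitize_history_py historical_data → Spec_sanitize_history_py historical_data (sanitize_history_py historical_data)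

-- ===== LEMMAS AND PROOFS =====

-- one step of the filter pass (B's first loop)
def pvStep (acc : List (Int × Int)) (item : List (String × Int)) : List (Int × Int) :=
  match (PySem.Dict.mk item).get? "year", (PySem.Dict.mk item).get? "population" with
  | some year, some population => acc ++ [(year, population)]
  | _, _ => acc

-- the filtered (year, population) pairs, in input order
def pvPairs (hd : List (List (String × Int))) : List (Int × Int) :=
  hd.foldl pvStep []

def pvIns (d : PySem.Dict Int Int) (p : Int × Int) : PySem.Dict Int Int := d.insert p.1 p.2

def pvDict (ps : List (Int × Int)) : PySem.Dict Int Int :=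
  ps.foldl pvIns PySem.Dict.empty

-- last population recorded for a year (0 if absent)
def pvLast (ps : List (Int × Int)) (y : Int) : Int :=
  (ps.filter (fun p => decide (p.1 = y))).foldl (fun _ p => p.2) 0

def pvG (ps : List (Int × Int)) : Int → Int × Int := fun y => (y, pvLast ps y)

-- canonical result: years sorted ascending, each with its last population
def pvCanon (ps : List (Int × Int)) : List (Int × Int) :=
  (PySem.List.sorted (PySem.Set.ofList (ps.map (fun p => p.1))) (fun y => y) false).map (pvG ps)

theorem pvStep_eq (acc : List (Int × Int)) (item : List (String × Int)) :
    pvStep acc item = acc ++ pvStep [] item := by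
  unfold pvStep
  rcases (PySem.Dict.mk item).get? "year" with _ | y <;>
    rcases (PySem.Dict.mk item).get? "population" with _ | p <;> simp

theorem pvPairs_shift (hd : List (List (String × Int))) :
    ∀ acc : List (Int × Int), hd.foldl pvStep acc = acc ++ hd.foldl pvStep [] := by
  induction hd with
  | nil => intro acc; simp
  | cons item t ih =>
    intro acc
    simp only [List.foldl_cons]
    rw [ih (pvStep acc item), ih (pvStep [] item), pvStep_eq acc item, List.append_assoc]

-- A's loop over the raw records is the insert-fold over the filtered pairs
theorem pvFoldA_eq (hd : List (List (String × Int))) :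
    ∀ d : PySem.Dict Int Int,
      (hd.foldl (fun d item =>
        match (PySem.Dict.mk item).get? "year", (PySem.Dict.mk item).get? "population" with
        | some year, some population => d.insert year population
        | _, _ => d) d) = (hd.foldl pvStep []).foldl pvIns d := by
  induction hd with
  | nil => intro d; simp
  | cons item t ih =>
    intro d
    simp only [List.foldl_cons]
    rw [pvPairs_shift t (pvStep [] item), List.foldl_append, ih]
    congr 1
    unfold pvStep pvIns
    rcases (PySem.Dict.mk item).get? "year" with _ | y <;>
      rcases (PySem.Dict.mk item).get? "population" with _ | p <;> simp

theorem pvLast_append (ps : List (Int × Int)) (p : Int × Int) (y : Int) :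
    pvLast (ps ++ [p]) y = if p.1 = y then p.2 else pvLast ps y := by
  unfold pvLast
  rw [List.filter_append]
  by_cases h : p.1 = y
  · simp [h, List.foldl_append]
  · simp [h]

-- dict lookup = last value for the year
theorem pvGetD_pvDict (ps : List (Int × Int)) (y : Int) :
    (pvDict ps).getD y 0 = pvLast ps y := by
  induction ps using List.reverseRecOn with
  | nil => simp [pvDict, pvLast, PySem.Dict.getD_empty]
  | append_singleton ps p ih =>
    unfold pvDict
    rw [List.foldl_append, pvLast_append]
    simp only [List.foldl_cons, List.foldl_nil]
    show ((ps.foldl pvIns PySem.Dict.empty).insert p.1 p.2).getD y 0 = _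
    rw [PySem.Dict.getD_insert]
    by_cases h : p.1 = y
    · simp [h]
    · simp only [h, if_false]
      rw [if_neg (by exact fun hy => h hy.symm)]
      exact ih

theorem pvKeys_pvDict (ps : List (Int × Int)) :
    (pvDict ps).keys = PySem.Set.ofList (ps.map (fun p => p.1)) := by
  have h := PySem.Dict.keys_foldl_insert_key (ν := Int) ps (fun p => p.1)
    (fun _ p => p.2) PySem.Dict.empty
  simpa [pvDict, pvIns, PySem.Dict.keys_empty, PySem.Set.update_nil_left] using h

theorem pvNodupKeys_pvDict (ps : List (Int × Int)) : (pvDict ps).keys.Nodup := by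
  have h := PySem.Dict.nodup_keys_foldl_insert_key (ν := Int) ps (fun p => p.1)
    (fun _ p => p.2) PySem.Dict.empty PySem.Dict.nodup_keys_empty
  simpa [pvDict, pvIns] using h

theorem pvItems_pvDict (ps : List (Int × Int)) :
    (pvDict ps).items = (PySem.Set.ofList (ps.map (fun p => p.1))).map (pvG ps) := by
  rw [PySem.Dict.items_eq_map_keys (pvDict ps) (pvNodupKeys_pvDict ps) 0, pvKeys_pvDict]
  exact List.map_congr_left (fun k _ => by simp [pvG, pvGetD_pvDict])

-- insertBy only looks at `before x ·` on members of the accumulator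
theorem pvInsertBy_congr {α : Type} (b1 b2 : α → α → Bool) (x : α) :
    ∀ acc : List α, (∀ y ∈ acc, b1 x y = b2 x y) →
      PySem.List.insertBy b1 x acc = PySem.List.insertBy b2 x acc := by
  intro acc
  induction acc with
  | nil => intro _; simp [PySem.List.insertBy]
  | cons y ys ih =>
    intro h
    simp only [PySem.List.insertBy]
    rw [h y (by simp)]
    by_cases hb : b2 x y = true
    · simp [hb]
    · simp only [Bool.not_eq_true] at hb
      simp [hb, ih (fun z hz => h z (by simp [hz]))]

theorem pvFoldInsertBy_congr {α : Type} (b1 b2 : α → α → Bool) :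
    ∀ (l acc : List α), (∀ x ∈ l, ∀ y, (y ∈ acc ∨ y ∈ l) → b1 x y = b2 x y) →
      l.foldl (fun acc x => PySem.List.insertBy b1 x acc) acc
        = l.foldl (fun acc x => PySem.List.insertBy b2 x acc) acc := by
  intro l
  induction l with
  | nil => intro acc _; rfl
  | cons x t ih =>
    intro acc h
    simp only [List.foldl_cons]
    rw [pvInsertBy_congr b1 b2 x acc (fun y hy => h x (by simp) y (Or.inl hy))]
    exact ih _ (fun z hz y hy => by
      rcases hy with hy | hy
      · rcases (PySem.List.mem_insertBy b2 x y acc).mp hy with rfl | hy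
        · exact h z (by simp [hz]) y (Or.inr (by simp))
        · exact h z (by simp [hz]) y (Or.inl hy)
      · exact h z (by simp [hz]) y (Or.inr (by simp [hy])))

-- on a list with distinct first components, Python's tuple sort is the sort by first component
theorem pvSorted2_eq_sorted (xs : List (Int × Int))
    (H : ∀ a ∈ xs, ∀ b ∈ xs, a.1 = b.1 → a = b) :
    PySem.List.sorted2 xs Prod.fst Prod.snd false = PySem.List.sorted xs (fun p => p.1) false := by
  rw [PySem.List.sorted_eq_foldl_insertBy]
  show List.foldl (fun acc x => PySem.List.insertBy _ x acc) [] xs = _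
  apply pvFoldInsertBy_congr
  intro x hx y hy
  have hy' : y ∈ xs := by
    rcases hy with h | h
    · simp at h
    · exact h
  show (decide (x.1 < y.1) || (!decide (y.1 < x.1) && decide (x.2 < y.2)))
      = decide (x.1 < y.1)
  rcases lt_trichotomy x.1 y.1 with h | h | h
  · simp [h, not_lt.mpr (le_of_lt h)]
  · have hxy : x = y := H x hx y hy' h
    subst hxy
    simp
  · simp [h, not_lt.mpr (le_of_lt h)]

-- A's sorted dict items are the canonical list
theorem pvA_canon (ps : List (Int × Int)) :
    PySem.List.sorted2 (pvDict ps).items Prod.fst Prod.snd false = pvCanon ps := by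
  have H : ∀ a ∈ (pvDict ps).items, ∀ b ∈ (pvDict ps).items, a.1 = b.1 → a = b := by
    intro a ha b hb hab
    have h1 : (pvDict ps).get? a.1 = some a.2 :=
      PySem.Dict.get?_of_mem_items (pvDict ps) (by simpa using ha) (pvNodupKeys_pvDict ps)
    have h2 : (pvDict ps).get? b.1 = some b.2 :=
      PySem.Dict.get?_of_mem_items (pvDict ps) (by simpa using hb) (pvNodupKeys_pvDict ps)
    rw [hab] at h1
    rw [h1] at h2
    exact Prod.ext hab (by injection h2)
  rw [pvSorted2_eq_sorted _ H]
  apply PySem.List.sorted_eq_of_perm_of_pairwise_lt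
  · rw [pvItems_pvDict]
    exact (PySem.List.sorted_perm (PySem.Set.ofList (ps.map (fun p => p.1))) (fun y => y) false).map (pvG ps)
  · have := PySem.List.sorted_ofList_pairwise_lt (ps.map (fun p => p.1))
    exact this.map (pvG ps) (fun a b h => h)

-- ===== stability of the sort, and the collapse pass =====

theorem pvFilter_insertBy (c : Int) (x : Int × Int) :
    ∀ acc : List (Int × Int), acc.Pairwise (fun a b => a.1 ≤ b.1) →
      (PySem.List.insertBy (fun a b => decide (a.1 < b.1)) x acc).filter (fun p => decide (p.1 = c))
        = if x.1 = c then acc.filter (fun p => decide (p.1 = c)) ++ [x]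
          else acc.filter (fun p => decide (p.1 = c)) := by
  intro acc
  induction acc with
  | nil =>
    intro _
    by_cases h : x.1 = c <;> simp [PySem.List.insertBy, h]
  | cons y ys ih =>
    intro hp
    simp only [PySem.List.insertBy]
    by_cases hlt : x.1 < y.1
    · simp only [hlt, decide_true, if_true]
      by_cases hc : x.1 = c
      · have hnone : ∀ z ∈ y :: ys, ¬ (z.1 = c) := by
          intro z hz
          rcases List.mem_cons.mp hz with rfl | hz'
          · omega
          · have := (List.pairwise_cons.mp hp).1 z hz'
            omega
        rw [List.filter_cons_of_pos (by simp [hc])]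
        have hempty : (y :: ys).filter (fun p => decide (p.1 = c)) = [] := by
          apply List.filter_eq_nil_iff.mpr
          intro z hz
          simp [hnone z hz]
        simp [hc, hempty]
      · simp [hc, List.filter_cons]
    · simp only [hlt, decide_false]
      have ih' := ih (List.pairwise_cons.mp hp).2
      by_cases hc : x.1 = c <;>
        by_cases hyc : y.1 = c <;>
          simp [hc, hyc, ih']

-- stable sort: the entries of each year keep their order
theorem pvFilter_sorted (ps : List (Int × Int)) (c : Int) :
    (PySem.List.sorted ps (fun p => p.1) false).filter (fun p => decide (p.1 = c))
      = ps.filter (fun p => decide (p.1 = c)) := by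
  induction ps using List.reverseRecOn with
  | nil => simp [PySem.List.sorted]
  | append_singleton ps p ih =>
    rw [PySem.List.sorted_eq_foldl_insertBy, List.foldl_append]
    simp only [List.foldl_cons, List.foldl_nil]
    rw [← PySem.List.sorted_eq_foldl_insertBy]
    rw [pvFilter_insertBy c p _ (PySem.List.sorted_pairwise ps (fun p => p.1)), List.filter_append]
    by_cases hc : p.1 = c
    · simp [hc, ih]
    · simp [hc, ih]

theorem pvLast_sorted (ps : List (Int × Int)) (y : Int) :
    pvLast (PySem.List.sorted ps (fun p => p.1) false) y = pvLast ps y := by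
  unfold pvLast
  rw [pvFilter_sorted]

theorem pvDedup_pairwise_le (l : List Int) (h : l.Pairwise (· ≤ ·)) :
    (PySem.Set.ofList l).Pairwise (· ≤ ·) := by
  induction l using List.reverseRecOn with
  | nil => simp [PySem.Set.ofList]
  | append_singleton l x ih =>
    rw [PySem.Set.ofList_eq_foldl, List.foldl_append] at *
    simp only [List.foldl_cons, List.foldl_nil]
    rw [← PySem.Set.ofList_eq_foldl] at *
    rcases List.pairwise_append.mp h with ⟨h1, _, h3⟩
    rw [PySem.Set.add_eq_ite]
    by_cases hin : x ∈ PySem.Set.ofList l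
    · simp only [hin, if_true]
      exact ih h1
    · simp only [hin, if_false]
      apply List.pairwise_append.mpr
      exact ⟨ih h1, List.pairwise_singleton _ _,
        fun a ha c hc => by
          rw [List.mem_singleton] at hc
          subst hc
          exact h3 a ((PySem.Set.mem_ofList l a).mp ha) _ (by simp)⟩

theorem pvGetLast_of_max (x : Int) :
    ∀ d : List Int, d.Pairwise (· < ·) → x ∈ d → (∀ y ∈ d, y ≤ x) → d.getLast? = some x := by
  intro d
  induction d with
  | nil => intro _ hx _; simp at hx
  | cons a t ih =>
    intro hp hx hmax
    rcases t with _ | ⟨b, t'⟩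
    · simp at hx
      simp [hx]
    · have hx' : x ∈ b :: t' := by
        rcases List.mem_cons.mp hx with rfl | h
        · exfalso
          have hab : x < b := (List.pairwise_cons.mp hp).1 b (by simp)
          have := hmax b (by simp)
          omega
        · exact h
      rw [List.getLast?_cons_cons]
      exact ih (List.pairwise_cons.mp hp).2 hx' (fun y hy => hmax y (by simp [List.mem_cons.mp hy]))

-- the collapse pass over any ≤-sorted list
theorem pvCollapse (sp : List (Int × Int)) (h : sp.Pairwise (fun a b => a.1 ≤ b.1)) :
    (sp.foldl (fun out yp =>
      match out.getLast? with
      | some last => if last.1 = yp.1 then out.dropLast ++ [yp] else out ++ [yp]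
      | none => [yp]) [])
    = (PySem.Set.ofList (sp.map (fun p => p.1))).map (fun y => (y, pvLast sp y)) := by
  induction sp using List.reverseRecOn with
  | nil => simp [PySem.Set.ofList]
  | append_singleton sp p ih =>
    rcases List.pairwise_append.mp h with ⟨h1, _, h3⟩
    rw [List.foldl_append, ih h1]
    simp only [List.foldl_cons, List.foldl_nil, List.map_append, List.map_cons, List.map_nil]
    have hD : PySem.Set.ofList ((sp.map (fun p => p.1)) ++ [p.1])
        = PySem.Set.add (PySem.Set.ofList (sp.map (fun p => p.1))) p.1 := by
      rw [PySem.Set.ofList_eq_foldl, List.foldl_append, ← PySem.Set.ofList_eq_foldl]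
      simp
    set D := PySem.Set.ofList (sp.map (fun p => p.1)) with hDdef
    have hDle : D.Pairwise (· ≤ ·) := pvDedup_pairwise_le _ (h1.map _ (fun a b hab => hab))
    have hDnd : D.Nodup := PySem.Set.nodup_ofList _
    have hDlt : D.Pairwise (· < ·) := by
      have hne : D.Pairwise (· ≠ ·) := hDnd
      exact (hDle.and hne).imp (fun hab => lt_of_le_of_ne hab.1 hab.2)
    have hmax : ∀ y ∈ D, y ≤ p.1 := by
      intro y hy
      rcases List.mem_map.mp ((PySem.Set.mem_ofList _ y).mp hy) with ⟨q, hq, rfl⟩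
      exact h3 q hq p (by simp)
    have hGlast : ∀ y ∈ D, pvLast (sp ++ [p]) y = if p.1 = y then p.2 else pvLast sp y :=
      fun y _ => pvLast_append sp p y
    rw [hD, PySem.Set.add_eq_ite]
    by_cases hin : p.1 ∈ D
    · -- the year is already present: it is the LAST element of D
      have hlast : D.getLast? = some p.1 := pvGetLast_of_max p.1 D hDlt hin hmax
      have hDne : D ≠ [] := by intro h0; rw [h0] at hin; simp at hin
      have hsplit : D = D.dropLast ++ [p.1] := by
        conv_lhs => rw [← List.dropLast_append_getLast hDne]
        have : D.getLast hDne = p.1 := by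
          have := List.getLast?_eq_some_getLast (l := D) hDne  -- name check
          rw [this] at hlast
          injection hlast
        rw [this]
      have hnotl : p.1 ∉ D.dropLast := by
        intro hmem
        have := hDnd
        rw [hsplit] at this
        rcases List.nodup_append.mp this with ⟨-, -, hdisj⟩
        exact hdisj p.1 hmem p.1 (List.mem_singleton_self _) rfl
      -- LHS: last of acc is (p.1, _) so collapse replaces it
      rw [if_pos hin]
      have haccl : (D.map (fun y => (y, pvLast sp y))).getLast?
          = some (p.1, pvLast sp p.1) := by
        rw [List.getLast?_map, hlast]; rfl
      rw [haccl]
      show (if (p.1, pvLast sp p.1).1 = p.1 then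
              (D.map (fun y => (y, pvLast sp y))).dropLast ++ [p]
            else D.map (fun y => (y, pvLast sp y)) ++ [p])
          = _
      rw [if_pos rfl]
      conv_rhs => rw [hsplit, List.map_append]
      congr 1
      · rw [← List.map_dropLast]
        symm
        apply List.map_congr_left
        intro y hy
        have hyne : p.1 ≠ y := fun hEq => hnotl (hEq ▸ hy)
        rw [pvLast_append, if_neg hyne]
      · simp [pvLast_append]
    · rw [if_neg hin, List.map_append]
      have hmap : D.map (fun y => (y, pvLast (sp ++ [p]) y)) = D.map (fun y => (y, pvLast sp y)) := by
        apply List.map_congr_left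
        intro y hy
        have hyne : p.1 ≠ y := fun hEq => hin (hEq ▸ hy)
        rw [pvLast_append, if_neg hyne]
      rw [hmap]
      rcases hD2 : D.map (fun y => (y, pvLast sp y)) |>.getLast? with _ | q
      · -- acc empty
        have : D = [] := by
          cases hD3 : D with
          | nil => rfl
          | cons a t => rw [hD3] at hD2; simp at hD2
        rw [this]
        simp [pvLast_append]
      · have hq1 : q.1 ≠ p.1 := by
          have hqmem := List.mem_of_getLast? hD2
          rcases List.mem_map.mp hqmem with ⟨y, hy, rfl⟩
          exact fun hEq => hin (hEq ▸ hy)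
        show (if q.1 = p.1 then (D.map (fun y => (y, pvLast sp y))).dropLast ++ [p]
              else D.map (fun y => (y, pvLast sp y)) ++ [p]) = _
        rw [if_neg hq1]
        simp [pvLast_append]

-- B's filter pass (nested None-checks) builds pvPairs
theorem pvPairsNested_eq (hd : List (List (String × Int))) :
    (hd.foldl (fun acc item =>
      match (PySem.Dict.mk item).get? "year" with
      | none => acc
      | some year =>
        match (PySem.Dict.mk item).get? "population" with
        | none => acc
        | some population => acc ++ [(year, population)]) []) = pvPairs hd := by
  unfold pvPairs
  congr 1
  funext acc item
  unfold pvStep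
  rcases (PySem.Dict.mk item).get? "year" with _ | y <;>
    rcases (PySem.Dict.mk item).get? "population" with _ | p <;> rfl

-- B's collapse of the stable-sorted pairs is the canonical list
theorem pvB_canon (ps : List (Int × Int)) :
    ((PySem.List.sorted ps (fun p => p.1) false).foldl (fun out yp =>
      match out.getLast? with
      | some last => if last.1 = yp.1 then out.dropLast ++ [yp] else out ++ [yp]
      | none => [yp]) []) = pvCanon ps := by
  rw [pvCollapse _ (PySem.List.sorted_pairwise ps (fun p => p.1))]
  unfold pvCanon pvG
  have hset : PySem.Set.ofList ((PySem.List.sorted ps (fun p => p.1) false).map (fun p => p.1))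
      = PySem.List.sorted (PySem.Set.ofList (ps.map (fun p => p.1))) (fun y => y) false := by
    symm
    apply PySem.List.sorted_eq_of_perm_of_pairwise_lt
    · apply (List.perm_ext_iff_of_nodup (PySem.Set.nodup_ofList _) (PySem.Set.nodup_ofList _)).mpr
      intro a
      rw [PySem.Set.mem_ofList, PySem.Set.mem_ofList]
      constructor
      · intro ha
        rcases List.mem_map.mp ha with ⟨q, hq, rfl⟩
        exact List.mem_map_of_mem ((PySem.List.sorted_perm ps (fun p => p.1) false).mem_iff.mp hq)
      · intro ha
        rcases List.mem_map.mp ha with ⟨q, hq, rfl⟩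
        exact List.mem_map_of_mem ((PySem.List.sorted_perm ps (fun p => p.1) false).mem_iff.mpr hq)
    · have hle : (PySem.Set.ofList ((PySem.List.sorted ps (fun p => p.1) false).map (fun p => p.1))).Pairwise (· ≤ ·) :=
        pvDedup_pairwise_le _ ((PySem.List.sorted_pairwise ps (fun p => p.1)).map _ (fun a b hab => hab))
      have hne : (PySem.Set.ofList ((PySem.List.sorted ps (fun p => p.1) false).map (fun p => p.1))).Pairwise (· ≠ ·) :=
        PySem.Set.nodup_ofList _
      exact (hle.and hne).imp (fun hab => lt_of_le_of_ne hab.1 hab.2)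
  rw [hset]
  apply List.map_congr_left
  intro y _
  rw [pvLast_sorted]

-- ===== VERDICT (by name: the statement is the Claim_ definition above) =====
theorem sanitize_history_py_spec : Claim_equal_sanitize_history_py := by
  intro hd _
  unfold Spec_sanitize_history_py sanitize_history_py sanitize_history_py_alt
  simp only []
  rw [show (hd.foldl (fun d item =>
      match (PySem.Dict.mk item).get? "year", (PySem.Dict.mk item).get? "population" with
      | some year, some population => d.insert year population
      | _, _ => d) PySem.Dict.empty) = pvDict (pvPairs hd) from pvFoldA_eq hd PySem.Dict.empty,
    pvA_canon]
  rw [show (hd.foldl (fun acc item =>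
      match (PySem.Dict.mk item).get? "year" with
      | none => acc
      | some year =>
        match (PySem.Dict.mk item).get? "population" with
        | none => acc
        | some population => acc ++ [(year, population)]) []) = pvPairs hd from pvPairsNested_eq hd, pvB_canon]
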